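-- pv_equiv track=rewrite | github.com/guzhuofan/AODMP_NP_RNP | RNP/RNP.py | RNP
-- ===== SOURCE A (Python) =====
-- from itertools import combinations
--
-- def RNP(n, path, W):
--     """
--     计算路径p上无公共链路的n个子路径族集合
--     :param n: 需要选取的子路径数量
--     :param path: 路径节点列表，如[1,2,3,4,5]
--     :param W: 所有有效OD对集合，如[(1,2), (3,4), (4,5)]
--     :return: 符合条件的子路径族集合，元素为按路径顺序排列的边元组
--     """
--     # 生成所有合法子路径
--     valid_subpaths = generate_valid_subpaths(path, W)
--
--     # 枚举所有n个元素的组合并筛选无冲突的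
--     valid_combos = []
--     for combo in combinations(valid_subpaths, n):
--         if is_independent(combo):
--             sorted_combo = sorted(combo, key=lambda x: x['start'])
--             # 给combo列表中的字典按start值从小到大排序,为sorted_combo列表
--             valid_combos.append([tuple(sp['edges']) for sp in sorted_combo])
--             # 将一组没有公共链路的(子路径元组,子路径元组中每个小元组代表一条弧)
--             # 构成一个列表,将列表添加到valid_combos列表中
--             # 一个列表代表一种子路径组合
--     return valid_combos
--
-- def generate_valid_subpaths(path, W):
--     """生成路径上所有满足OD对的有效子路径"""
--     W_set = {(o, d) for o, d in W}
--     subpaths = []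
--     for start in range(len(path)):
--         for end in range(start + 1, len(path)):
--             od = (path[start], path[end])
--             if od in W_set:
--                 edges = [(path[i], path[i + 1]) for i in range(start, end)]
--                 # 将每个P上的子路径分为一段段弧,每个弧是(s,t)的元组,元组构成的列表就是这条子路径
--                 subpaths.append({
--                     'edges': edges, # 弧元组组成的列表
--                     'edges_set': set(edges), # 弧元组组成的集合
--                     'start': start  # 用于结果排序
--                 })
--     return subpaths
--
-- def is_independent(combo):
--     """检查组合内所有子路径边是否互不相交"""
--     seen = set()
--     for sp in combo:
--         if seen & sp['edges_set']:
--             return False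
--         seen.update(sp['edges_set'])
--     return True
-- ===== SOURCE B (Python) =====
-- def RNP(n, path, W):
--     # Index-increasing backtracking over the valid subpaths, pruning a branch
--     # at the first edge overlap, instead of filtering all C(m, n) combinations;
--     # subpaths are generated in start order, so no final sort is needed.
--     W_set = set(W)
--     subs = []
--     for start in range(len(path)):
--         for end in range(start + 1, len(path)):
--             if (path[start], path[end]) in W_set:
--                 subs.append([(path[i], path[i + 1]) for i in range(start, end)])
--     out = []
--
--     def rec(i, k, seen, acc):
--         if k == 0:
--             out.append(acc)
--             return
--         for j in range(i, len(subs)):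
--             es = set(subs[j])
--             if not (seen & es):
--                 rec(j + 1, k - 1, seen | es, acc + [tuple(subs[j])])
--
--     rec(0, n, set(), [])
--     return out
-- ===== Notes on version B (the rewrite author's own statement) =====
-- stated objective: alternative
-- what changed: Replaces A's filter of all C(m,n) subpath combinations (each re-checked from scratch and then re-sorted) by index-increasing backtracking that shares the growing 'seen' edge set, prunes a branch at the first overlap, and emits results already in start order with no sort.
import Mathlib
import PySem

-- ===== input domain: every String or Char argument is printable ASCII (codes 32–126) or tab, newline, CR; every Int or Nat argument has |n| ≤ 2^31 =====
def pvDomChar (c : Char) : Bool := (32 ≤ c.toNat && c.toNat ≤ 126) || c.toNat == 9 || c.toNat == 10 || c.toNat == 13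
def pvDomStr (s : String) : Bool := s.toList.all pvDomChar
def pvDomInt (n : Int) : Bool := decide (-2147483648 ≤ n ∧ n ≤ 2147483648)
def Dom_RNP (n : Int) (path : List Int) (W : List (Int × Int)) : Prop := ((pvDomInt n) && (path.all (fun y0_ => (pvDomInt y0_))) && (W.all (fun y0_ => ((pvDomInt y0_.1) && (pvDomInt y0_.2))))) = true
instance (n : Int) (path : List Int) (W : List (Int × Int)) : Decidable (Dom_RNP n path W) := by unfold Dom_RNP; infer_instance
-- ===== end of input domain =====

-- B replaces A's filter over all C(m,n) combinations by index-increasing backtracking that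
-- prunes on the first edge overlap and needs no final sort (objective: alternative algorithm).

-- ===== PORT A =====
-- subpath dict {'edges': …, 'edges_set': …, 'start': …} as a triple
-- (indices start/end/i range over in-range nonnegative positions, so List.getD is exact here)
def genValidSubpaths (path : List Int) (W : List (Int × Int)) :
    List (List (Int × Int) × PySem.Set (Int × Int) × Nat) :=
  let Wset := PySem.Set.ofList W
  (List.range path.length).flatMap (fun s =>
    (List.range' (s + 1) (path.length - (s + 1))).flatMap (fun e =>
      if Wset.contains (path.getD s 0, path.getD e 0) then
        let edges := (List.range' s (e - s)).map (fun i => (path.getD i 0, path.getD (i + 1) 0))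
        [(edges, PySem.Set.ofList edges, s)]
      else []))

-- is_independent's loop, carrying the 'seen' set
def isIndependentGo : List (List (Int × Int) × PySem.Set (Int × Int) × Nat) →
    PySem.Set (Int × Int) → Bool
  | [], _ => true
  | sp :: rest, seen =>
      if (PySem.Set.inter seen sp.2.1).isEmpty then
        isIndependentGo rest (PySem.Set.update seen sp.2.1)
      else false

def isIndependent (combo : List (List (Int × Int) × PySem.Set (Int × Int) × Nat)) : Bool :=
  isIndependentGo combo PySem.Set.empty

def RNP (n : Int) (path : List Int) (W : List (Int × Int)) : List (List (List (Int × Int))) :=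
  let valid_subpaths := genValidSubpaths path W
  (PySem.List.combinations valid_subpaths n.toNat).foldl
    (fun acc combo =>
      if isIndependent combo then
        acc ++ [(PySem.List.sorted combo (fun sp => sp.2.2)).map (fun sp => sp.1)]
      else acc) []

-- ===== PORT B =====
-- B keeps only the edge lists of the valid subpaths (same double loop)
def genSubsB (path : List Int) (W : List (Int × Int)) : List (List (Int × Int)) :=
  let Wset := PySem.Set.ofList W
  (List.range path.length).flatMap (fun s =>
    (List.range' (s + 1) (path.length - (s + 1))).flatMap (fun e =>
      if Wset.contains (path.getD s 0, path.getD e 0) then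
        [(List.range' s (e - s)).map (fun i => (path.getD i 0, path.getD (i + 1) 0))]
      else []))

-- B's rec(i, k, seen, acc): the 'for j in range(i, …)' loop unrolled structurally on the suffix
def recB : List (List (Int × Int)) → Int → PySem.Set (Int × Int) → List (List (Int × Int)) →
    List (List (List (Int × Int)))
  | [], k, _, acc => if k = 0 then [acc] else []
  | x :: t, k, seen, acc =>
      if k = 0 then [acc]
      else
        (if (PySem.Set.inter seen (PySem.Set.ofList x)).isEmpty then
          recB t (k - 1) (PySem.Set.union seen (PySem.Set.ofList x)) (acc ++ [x])
        else []) ++ recB t k seen acc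

def RNP_alt (n : Int) (path : List Int) (W : List (Int × Int)) : List (List (List (Int × Int))) :=
  recB (genSubsB path W) n PySem.Set.empty []

-- ===== PRECONDITION & SPEC =====
-- Python's combinations(xs, n) raises ValueError for negative n: those inputs are excluded.
def Pre_RNP (n : Int) (path : List Int) (W : List (Int × Int)) : Prop := 0 ≤ n
instance (n : Int) (path : List Int) (W : List (Int × Int)) : Decidable (Pre_RNP n path W) := by
  unfold Pre_RNP; infer_instance
def pvWitness_RNP : Int × List Int × (List (Int × Int)) := (1, [1, 2], [(1, 2)])

def Spec_RNP (n : Int) (path : List Int) (W : List (Int × Int)) (out : List (List (List (Int × Int)))) : Prop := out = RNP_alt n path W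
instance (n : Int) (path : List Int) (W : List (Int × Int)) (out : List (List (List (Int × Int)))) : Decidable (Spec_RNP n path W out) := by unfold Spec_RNP; infer_instance

-- ===== CLAIM (what is proved, stated in full; the proofs are below) =====
def Claim_equal_RNP : Prop := ∀ (n : Int) (path : List Int) (W : List (Int × Int)), Dom_RNP n path W → Pre_RNP n path W → Spec_RNP n path W (RNP n path W)

-- ===== LEMMAS AND PROOFS =====

-- B's conflict test as a predicate on a whole candidate combination (edge lists)
def indepB : List (List (Int × Int)) → PySem.Set (Int × Int) → Bool
  | [], _ => true
  | x :: t, seen =>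
      if (PySem.Set.inter seen (PySem.Set.ofList x)).isEmpty then
        indepB t (PySem.Set.union seen (PySem.Set.ofList x))
      else false

-- B's subpath list is A's with only the edge component kept
theorem genSubsB_eq (path : List Int) (W : List (Int × Int)) :
    genSubsB path W = (genValidSubpaths path W).map (fun sp => sp.1) := by
  simp only [genSubsB, genValidSubpaths, List.map_flatMap]
  refine List.flatMap_congr (fun s _ => ?_)
  refine List.flatMap_congr (fun e _ => ?_)
  split <;> simp

-- every A-subpath stores exactly the set of its own edges, and its start index
theorem mem_genValidSubpaths (path : List Int) (W : List (Int × Int))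
    (sp : List (Int × Int) × PySem.Set (Int × Int) × Nat)
    (h : sp ∈ genValidSubpaths path W) : sp.2.1 = PySem.Set.ofList sp.1 := by
  simp only [genValidSubpaths, List.mem_flatMap] at h
  obtain ⟨s, _, e, _, h⟩ := h
  split at h <;> simp_all

-- starts are nondecreasing along A's subpath list
theorem pairwise_start (path : List Int) (W : List (Int × Int)) :
    (genValidSubpaths path W).Pairwise (fun a b => a.2.2 ≤ b.2.2) := by
  have hmem : ∀ s, ∀ sp ∈ ((List.range' (s + 1) (path.length - (s + 1))).flatMap (fun e =>
      if (PySem.Set.ofList W).contains (path.getD s 0, path.getD e 0) then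
        let edges := (List.range' s (e - s)).map (fun i => (path.getD i 0, path.getD (i + 1) 0))
        [(edges, PySem.Set.ofList edges, s)]
      else [])), sp.2.2 = s := by
    intro s sp h
    simp only [List.mem_flatMap] at h
    obtain ⟨e, _, h⟩ := h
    split at h <;> simp_all
  simp only [genValidSubpaths, List.flatMap_def]
  rw [List.pairwise_flatten]
  constructor
  · intro l hl
    simp only [List.mem_map] at hl
    obtain ⟨s, _, rfl⟩ := hl
    exact List.pairwise_of_forall_mem_list (fun x hx y hy => by
      rw [hmem s x hx, hmem s y hy])
  · refine List.Pairwise.map _ ?_ (List.pairwise_lt_range (n := path.length))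
    intro a b hab x hx y hy
    rw [hmem a x hx, hmem b y hy]; omega

-- A's independence test equals B's, for combinations whose sets are the sets of their edges
theorem indep_eq (combo : List (List (Int × Int) × PySem.Set (Int × Int) × Nat))
    (hinv : ∀ sp ∈ combo, sp.2.1 = PySem.Set.ofList sp.1) (seen : PySem.Set (Int × Int)) :
    indepB (combo.map (fun sp => sp.1)) seen = isIndependentGo combo seen := by
  induction combo generalizing seen with
  | nil => rfl
  | cons sp t ih =>
      have h1 : sp.2.1 = PySem.Set.ofList sp.1 := hinv sp (by simp)
      simp only [List.map_cons, indepB, isIndependentGo, h1]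
      split
      · exact ih (fun x hx => hinv x (by simp [hx])) _
      · rfl

-- B's backtracking is the filtered combination list, each prefixed by the accumulator
theorem recB_eq (xs : List (List (Int × Int))) (k : Nat) (seen : PySem.Set (Int × Int))
    (acc : List (List (Int × Int))) :
    recB xs (k : Int) seen acc =
      ((PySem.List.combinations xs k).filter (fun c => indepB c seen)).map (fun c => acc ++ c) := by
  induction xs generalizing k seen acc with
  | nil =>
      cases k with
      | zero => simp [recB, PySem.List.combinations_zero, indepB]
      | succ k =>
          rw [recB, if_neg (by omega)]
          simp [PySem.List.combinations_nil_succ]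
  | cons x t ih =>
      cases k with
      | zero => simp [recB, PySem.List.combinations_zero, indepB]
      | succ k =>
          rw [recB]
          simp only [Nat.cast_add, Nat.cast_one]
          rw [if_neg (by omega)]
          have hk1 : ((k : Int) + 1 - 1) = (k : Int) := by ring
          rw [hk1, PySem.List.combinations_cons_succ, List.filter_append, List.map_append,
            List.filter_map]
          congr 1
          · by_cases hok : (PySem.Set.inter seen (PySem.Set.ofList x)).isEmpty
            · rw [if_pos hok, ih]
              have : ((fun c => indepB c seen) ∘ (fun c => x :: c)) =
                  (fun c => indepB c (PySem.Set.union seen (PySem.Set.ofList x))) := by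
                funext c; simp [indepB, hok]
              rw [this, List.map_map]
              simp [Function.comp_def]
            · rw [if_neg hok]
              have : ((fun c => indepB c seen) ∘ (fun c => x :: c)) = (fun _ => false) := by
                funext c; simp [indepB, hok]
              rw [this]
              simp
          · exact_mod_cast ih (k + 1) seen acc

-- ===== VERDICT (by name: the statement is the Claim_ definition above) =====
theorem RNP_spec : Claim_equal_RNP := by
  intro n path W _ hpre
  unfold Spec_RNP RNP RNP_alt
  have hn : ((n.toNat : Nat) : Int) = n := Int.toNat_of_nonneg hpre
  rw [← hn, recB_eq, genSubsB_eq, PySem.List.combinations_map, List.filter_map]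
  simp only [PySem.List.foldl_append_if, List.nil_append]
  have hfil : List.filter ((fun c => indepB c PySem.Set.empty) ∘ List.map (fun sp => sp.1))
      (PySem.List.combinations (genValidSubpaths path W) n.toNat) =
      List.filter (fun c => isIndependent c)
      (PySem.List.combinations (genValidSubpaths path W) n.toNat) := by
    refine List.filter_congr (fun c hc => ?_)
    have hsub := PySem.List.sublist_of_mem_combinations hc
    exact indep_eq c (fun sp hsp => mem_genValidSubpaths path W sp (hsub.mem hsp))
      PySem.Set.empty
  rw [hfil, List.map_map]
  refine List.map_congr_left (fun c hc => ?_)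
  have hsub := PySem.List.sublist_of_mem_combinations (List.mem_of_mem_filter hc)
  have hpw : c.Pairwise (fun a b => a.2.2 ≤ b.2.2) := List.Pairwise.sublist hsub (pairwise_start path W)
  rw [PySem.List.sorted_eq_self_of_pairwise c (fun sp => sp.2.2) hpw]
  rfl
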